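-- pv_equiv track=rewrite | github.com/robertrichards45/MCPD | app/routes/mobile.py | _domestic_core_errors
-- ===== SOURCE A (Python) =====
-- def _domestic_lookup(draft, suffix):
--     suffix = str(suffix or '').strip()
--     if not suffix:
--         return ''
--     if suffix in draft:
--         return draft.get(suffix)
--     for key, value in draft.items():
--         clean_key = str(key or '').strip()
--         if clean_key == suffix or clean_key.endswith(f'.{suffix}'):
--             return value
--     return ''
--
-- def _domestic_truthy(draft, suffix):
--     return str(_domestic_lookup(draft, suffix) or '').strip().lower() in {'1', 'true', 'yes', 'on', 'x'}
--
-- def _domestic_core_errors(draft):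
--     errors = []
--     required_fields = [
--         ('Victim Name', 'VicName'),
--         ('Response Date', 'ResponseDate'),
--         ('Response Time', 'RespTime'),
--         ('Initial Incident / Violation Reported', 'Reported'),
--     ]
--     for label, key in required_fields:
--         if not str(_domestic_lookup(draft, key) or '').strip():
--             errors.append({'field': label, 'message': f'{label} is missing from the domestic supplemental.'})
--
--     if not any(_domestic_truthy(draft, key) for key in ('Victim', 'Suspect', 'Child', 'Other')):
--         errors.append({'field': 'Domestic Roles', 'message': 'Identify who the domestic incident involved.'})
--
--     conditional_requirements = [
--         ('Incident location detail', 'IncidentOther', 'Where'),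
--         ('Temporary address location', 'OtherLoc', 'Location'),
--         ('Other victim service location', 'NO', 'OtherLocation'),
--         ('Victim first aid by', 'VFA', 'FirstAidBy.1'),
--         ('Victim treatment facility', 'VMTF', 'Facility.1'),
--         ('Suspect first aid by', 'SFA', 'FirstAidBy.2'),
--         ('Suspect treatment facility', 'SMTF', 'Facility.2'),
--         ('Injury explanation', 'OtherEx', 'InjExplain'),
--         ('Second injury explanation', 'OtherEx1', 'InjExplain1'),
--     ]
--     for label, trigger_key, value_key in conditional_requirements:
--         if _domestic_truthy(draft, trigger_key) and not str(_domestic_lookup(draft, value_key) or '').strip():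
--             errors.append({'field': label, 'message': f'{label} is required for the selected domestic supplemental option.'})
--     return errors
-- ===== SOURCE B (Python) =====
-- _TARGETS = [
--     'VicName', 'ResponseDate', 'RespTime', 'Reported',
--     'Victim', 'Suspect', 'Child', 'Other',
--     'IncidentOther', 'Where', 'OtherLoc', 'Location', 'NO', 'OtherLocation',
--     'VFA', 'FirstAidBy.1', 'VMTF', 'Facility.1', 'SFA', 'FirstAidBy.2',
--     'SMTF', 'Facility.2', 'OtherEx', 'InjExplain', 'OtherEx1', 'InjExplain1',
-- ]
--
-- _REQUIRED = [
--     ('Victim Name', 'VicName'),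
--     ('Response Date', 'ResponseDate'),
--     ('Response Time', 'RespTime'),
--     ('Initial Incident / Violation Reported', 'Reported'),
-- ]
--
-- _CONDITIONAL = [
--     ('Incident location detail', 'IncidentOther', 'Where'),
--     ('Temporary address location', 'OtherLoc', 'Location'),
--     ('Other victim service location', 'NO', 'OtherLocation'),
--     ('Victim first aid by', 'VFA', 'FirstAidBy.1'),
--     ('Victim treatment facility', 'VMTF', 'Facility.1'),
--     ('Suspect first aid by', 'SFA', 'FirstAidBy.2'),
--     ('Suspect treatment facility', 'SMTF', 'Facility.2'),
--     ('Injury explanation', 'OtherEx', 'InjExplain'),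
--     ('Second injury explanation', 'OtherEx1', 'InjExplain1'),
-- ]
--
--
-- def _domestic_core_errors(draft):
--     # Build the whole lookup index in one pass instead of re-scanning draft per field.
--     index = {}
--     for t in _TARGETS:
--         if t in draft:
--             index[t] = draft[t]
--     for key, value in draft.items():
--         clean = str(key or '').strip()
--         for t in _TARGETS:
--             if t not in index and (clean == t or clean.endswith('.' + t)):
--                 index[t] = value
--
--     def val(t):
--         return str(index.get(t, '') or '').strip()
--
--     def truthy(t):
--         return val(t).lower() in {'1', 'true', 'yes', 'on', 'x'}
--
--     errors = [{'field': label,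
--                'message': f'{label} is missing from the domestic supplemental.'}
--               for label, key in _REQUIRED if not val(key)]
--     if not (truthy('Victim') or truthy('Suspect') or truthy('Child') or truthy('Other')):
--         errors.append({'field': 'Domestic Roles',
--                        'message': 'Identify who the domestic incident involved.'})
--     errors += [{'field': label,
--                 'message': f'{label} is required for the selected domestic supplemental option.'}
--                for label, trigger, value_key in _CONDITIONAL
--                if truthy(trigger) and not val(value_key)]
--     return errors
-- ===== Notes on version B (the rewrite author's own statement) =====
-- stated objective: alternative
-- what changed: B resolves all 26 field suffixes into one precomputed index (exact-key phase, then a single no-overwrite endswith scan over draft.items()) and the error checks read from that dict, instead of A's fresh full scan of the draft for every lookup.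
import Mathlib
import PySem

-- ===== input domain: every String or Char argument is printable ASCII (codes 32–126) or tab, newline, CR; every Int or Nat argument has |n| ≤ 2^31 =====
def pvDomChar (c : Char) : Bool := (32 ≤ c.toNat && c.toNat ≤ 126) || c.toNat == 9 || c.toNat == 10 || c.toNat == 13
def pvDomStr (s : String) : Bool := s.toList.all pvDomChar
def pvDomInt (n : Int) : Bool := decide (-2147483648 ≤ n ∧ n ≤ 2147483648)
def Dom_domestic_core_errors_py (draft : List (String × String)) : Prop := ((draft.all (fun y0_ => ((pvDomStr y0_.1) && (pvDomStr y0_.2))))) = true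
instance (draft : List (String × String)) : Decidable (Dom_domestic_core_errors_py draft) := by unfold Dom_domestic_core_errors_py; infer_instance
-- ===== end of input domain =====

-- One-line summary: B builds the suffix→value lookup index in ONE pass over the draft
-- (exact-key phase, then a no-overwrite endswith scan) instead of A's fresh full scan
-- of the draft for every one of the 26 fields; same required/roles/conditional checks.

-- ===== PORT A =====

-- the `for key, value in draft.items(): …` loop of _domestic_lookup
def domestic_scan_py : List (String × String) → String → String
  | [], _ => ""
  | (k, v) :: rest, s =>
    let clean_key := PySem.Str.strip k
    if clean_key == s || PySem.Str.endswith clean_key ("." ++ s) then v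
    else domestic_scan_py rest s

def domestic_lookup_py (draft : List (String × String)) (suffix : String) : String :=
  let s := PySem.Str.strip suffix
  if s == "" then ""
  else if draft.any (fun kv => kv.1 == s) then
    match draft.find? (fun kv => kv.1 == s) with
    | some kv => kv.2
    | none => ""
  else domestic_scan_py draft s

def domestic_truthy_py (draft : List (String × String)) (suffix : String) : Bool :=
  ["1", "true", "yes", "on", "x"].contains
    (PySem.Str.lower (PySem.Str.strip (domestic_lookup_py draft suffix)))

def domestic_core_errors_py (draft : List (String × String)) : List (List (String × String)) :=
  let required_fields : List (String × String) :=
    [("Victim Name", "VicName"), ("Response Date", "ResponseDate"),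
     ("Response Time", "RespTime"), ("Initial Incident / Violation Reported", "Reported")]
  let errors := required_fields.foldl (fun es lk =>
    if PySem.Str.strip (domestic_lookup_py draft lk.2) == "" then
      es ++ [[("field", lk.1), ("message", lk.1 ++ " is missing from the domestic supplemental.")]]
    else es) []
  let errors :=
    if !(["Victim", "Suspect", "Child", "Other"].any (fun k => domestic_truthy_py draft k)) then
      errors ++ [[("field", "Domestic Roles"), ("message", "Identify who the domestic incident involved.")]]
    else errors
  let conditional_requirements : List (String × String × String) :=
    [("Incident location detail", "IncidentOther", "Where"),
     ("Temporary address location", "OtherLoc", "Location"),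
     ("Other victim service location", "NO", "OtherLocation"),
     ("Victim first aid by", "VFA", "FirstAidBy.1"),
     ("Victim treatment facility", "VMTF", "Facility.1"),
     ("Suspect first aid by", "SFA", "FirstAidBy.2"),
     ("Suspect treatment facility", "SMTF", "Facility.2"),
     ("Injury explanation", "OtherEx", "InjExplain"),
     ("Second injury explanation", "OtherEx1", "InjExplain1")]
  conditional_requirements.foldl (fun es t =>
    if domestic_truthy_py draft t.2.1 &&
       (PySem.Str.strip (domestic_lookup_py draft t.2.2) == "") then
      es ++ [[("field", t.1), ("message", t.1 ++ " is required for the selected domestic supplemental option.")]]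
    else es) errors

-- ===== PORT B =====

def domesticTargets : List String :=
  ["VicName", "ResponseDate", "RespTime", "Reported",
   "Victim", "Suspect", "Child", "Other",
   "IncidentOther", "Where", "OtherLoc", "Location", "NO", "OtherLocation",
   "VFA", "FirstAidBy.1", "VMTF", "Facility.1", "SFA", "FirstAidBy.2",
   "SMTF", "Facility.2", "OtherEx", "InjExplain", "OtherEx1", "InjExplain1"]

def domesticMatch (clean t : String) : Bool :=
  clean == t || PySem.Str.endswith clean ("." ++ t)

-- Source B's index: exact-key phase, then a no-overwrite scan of draft.items()
def domesticIndex (draft : List (String × String)) : PySem.Dict String String :=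
  let index := domesticTargets.foldl (fun d t =>
    match draft.find? (fun kv => kv.1 == t) with
    | some kv => d.insert t kv.2
    | none => d) PySem.Dict.empty
  draft.foldl (fun d kv =>
    let clean := PySem.Str.strip kv.1
    domesticTargets.foldl (fun d t =>
      if !d.contains t && domesticMatch clean t then d.insert t kv.2 else d) d) index

def domesticVal (index : PySem.Dict String String) (t : String) : String :=
  PySem.Str.strip (index.getD t "")

def domesticTruthy (index : PySem.Dict String String) (t : String) : Bool :=
  ["1", "true", "yes", "on", "x"].contains (PySem.Str.lower (domesticVal index t))

def domestic_core_errors_py_alt (draft : List (String × String)) : List (List (String × String)) :=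
  let index := domesticIndex draft
  let errors :=
    (([("Victim Name", "VicName"), ("Response Date", "ResponseDate"),
       ("Response Time", "RespTime"), ("Initial Incident / Violation Reported", "Reported")].filter
       (fun lk : String × String => domesticVal index lk.2 == "")).map
      (fun lk => [("field", lk.1), ("message", lk.1 ++ " is missing from the domestic supplemental.")]))
  let errors :=
    if !(domesticTruthy index "Victim" || domesticTruthy index "Suspect" ||
         domesticTruthy index "Child" || domesticTruthy index "Other") then
      errors ++ [[("field", "Domestic Roles"), ("message", "Identify who the domestic incident involved.")]]
    else errors
  errors ++
    (([("Incident location detail", "IncidentOther", "Where"),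
       ("Temporary address location", "OtherLoc", "Location"),
       ("Other victim service location", "NO", "OtherLocation"),
       ("Victim first aid by", "VFA", "FirstAidBy.1"),
       ("Victim treatment facility", "VMTF", "Facility.1"),
       ("Suspect first aid by", "SFA", "FirstAidBy.2"),
       ("Suspect treatment facility", "SMTF", "Facility.2"),
       ("Injury explanation", "OtherEx", "InjExplain"),
       ("Second injury explanation", "OtherEx1", "InjExplain1")].filter
       (fun t : String × String × String =>
         domesticTruthy index t.2.1 && domesticVal index t.2.2 == "")).map
      (fun t => [("field", t.1), ("message", t.1 ++ " is required for the selected domestic supplemental option.")]))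

-- ===== PRECONDITION & SPEC =====
def Spec_domestic_core_errors_py (draft : List (String × String)) (out : List (List (String × String))) : Prop := out = domestic_core_errors_py_alt draft
instance (draft : List (String × String)) (out : List (List (String × String))) : Decidable (Spec_domestic_core_errors_py draft out) := by unfold Spec_domestic_core_errors_py; infer_instance

-- ===== CLAIM (what is proved, stated in full; the proofs are below) =====
def Claim_equal_domestic_core_errors_py : Prop := ∀ (draft : List (String × String)), Dom_domestic_core_errors_py draft → Spec_domestic_core_errors_py draft (domestic_core_errors_py draft)

-- ===== LEMMAS AND PROOFS =====

theorem domesticTargets_nodup : domesticTargets.Nodup := by decide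

theorem domesticTargets_fixed :
    ∀ t ∈ domesticTargets, PySem.Str.strip t = t ∧ (t == "") = false := by decide

theorem domestic_scan_eq (s : String) :
    ∀ l : List (String × String),
      domestic_scan_py l s =
        (((l.find? (fun kv => domesticMatch (PySem.Str.strip kv.1) s)).map (·.2)).getD "")
  | [] => by simp [domestic_scan_py]
  | (k, v) :: rest => by
    simp only [domestic_scan_py]
    rw [List.find?_cons]
    cases hc : domesticMatch (PySem.Str.strip k) s with
    | true =>
      have hc' : (PySem.Str.strip k == s || PySem.Str.endswith (PySem.Str.strip k) ("." ++ s)) = true := hc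
      simp only [hc', if_true]
      simp
    | false =>
      have hc' : (PySem.Str.strip k == s || PySem.Str.endswith (PySem.Str.strip k) ("." ++ s)) = false := hc
      simp only [hc', Bool.false_eq_true, if_false]
      exact domestic_scan_eq s rest

theorem fold1_get_notmem (draft : List (String × String)) :
    ∀ (ts : List String) (d : PySem.Dict String String) (t : String), t ∉ ts →
      (ts.foldl (fun d t =>
          match draft.find? (fun kv => kv.1 == t) with
          | some kv => d.insert t kv.2
          | none => d) d).get? t = d.get? t
  | [], d, t, _ => rfl
  | a :: ts, d, t, h => by
    have hne : t ≠ a := fun he => h (he ▸ List.mem_cons_self)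
    have hnm : t ∉ ts := fun hm => h (List.mem_cons_of_mem _ hm)
    simp only [List.foldl_cons]
    rw [fold1_get_notmem draft ts _ t hnm]
    cases hf : draft.find? (fun kv => kv.1 == a) with
    | none => rfl
    | some kv => exact PySem.Dict.get?_insert_of_ne d kv.2 hne

theorem fold1_get_mem (draft : List (String × String)) :
    ∀ (ts : List String) (d : PySem.Dict String String) (t : String), t ∈ ts → ts.Nodup →
      (ts.foldl (fun d t =>
          match draft.find? (fun kv => kv.1 == t) with
          | some kv => d.insert t kv.2
          | none => d) d).get? t =
        match draft.find? (fun kv => kv.1 == t) with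
        | some kv => some kv.2
        | none => d.get? t
  | [], d, t, h, _ => absurd h (List.not_mem_nil)
  | a :: ts, d, t, h, hnd => by
    rcases List.nodup_cons.mp hnd with ⟨hna, hndt⟩
    by_cases he : t = a
    · subst he
      simp only [List.foldl_cons]
      rw [fold1_get_notmem draft ts _ t hna]
      cases hf : draft.find? (fun kv => kv.1 == t) with
      | none => rfl
      | some kv => simp [PySem.Dict.get?_insert_self]
    · have hm : t ∈ ts := (List.mem_cons.mp h).resolve_left he
      simp only [List.foldl_cons]
      rw [fold1_get_mem draft ts _ t hm hndt]
      cases hf : draft.find? (fun kv => kv.1 == t) with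
      | none =>
        simp only
        cases hg : draft.find? (fun kv => kv.1 == a) with
        | none => rfl
        | some kv => exact PySem.Dict.get?_insert_of_ne d kv.2 he
      | some kv => rfl

theorem fold2i_get_notmem (clean : String) (v : String) :
    ∀ (ts : List String) (d : PySem.Dict String String) (t : String), t ∉ ts →
      (ts.foldl (fun d t =>
          if !d.contains t && domesticMatch clean t then d.insert t v else d) d).get? t = d.get? t
  | [], d, t, _ => rfl
  | a :: ts, d, t, h => by
    have hne : t ≠ a := fun he => h (he ▸ List.mem_cons_self)
    have hnm : t ∉ ts := fun hm => h (List.mem_cons_of_mem _ hm)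
    simp only [List.foldl_cons]
    rw [fold2i_get_notmem clean v ts _ t hnm]
    by_cases hc : (!d.contains a && domesticMatch clean a) = true
    · simp only [hc, if_pos]
      exact PySem.Dict.get?_insert_of_ne d v hne
    · simp [hc]

theorem fold2i_get_mem (clean : String) (v : String) :
    ∀ (ts : List String) (d : PySem.Dict String String) (t : String), t ∈ ts → ts.Nodup →
      (ts.foldl (fun d t =>
          if !d.contains t && domesticMatch clean t then d.insert t v else d) d).get? t =
        match d.get? t with
        | some w => some w
        | none => if domesticMatch clean t then some v else none
  | [], d, t, h, _ => absurd h (List.not_mem_nil)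
  | a :: ts, d, t, h, hnd => by
    rcases List.nodup_cons.mp hnd with ⟨hna, hndt⟩
    by_cases he : t = a
    · subst he
      simp only [List.foldl_cons]
      rw [fold2i_get_notmem clean v ts _ t hna]
      cases hg : d.get? t with
      | some w =>
        have hc : d.contains t = true := by
          cases hcc : d.contains t
          · rw [(PySem.Dict.get?_eq_none_iff_contains d t).mpr hcc] at hg; simp at hg
          · rfl
        simp [hc, hg]
      | none =>
        have hc : d.contains t = false := (PySem.Dict.get?_eq_none_iff_contains d t).mp hg
        by_cases hm : domesticMatch clean t = true
        · simp [hc, hm, PySem.Dict.get?_insert_self]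
        · simp only [Bool.not_eq_true] at hm
          simp [hc, hm, hg]
    · have hm : t ∈ ts := (List.mem_cons.mp h).resolve_left he
      simp only [List.foldl_cons]
      rw [fold2i_get_mem clean v ts _ t hm hndt]
      by_cases hc : (!d.contains a && domesticMatch clean a) = true
      · simp only [hc, if_pos]
        rw [PySem.Dict.get?_insert_of_ne d v he]
      · simp [hc]

theorem fold2_get (t : String) (ht : t ∈ domesticTargets) :
    ∀ (l : List (String × String)) (d : PySem.Dict String String),
      (l.foldl (fun d kv =>
          let clean := PySem.Str.strip kv.1
          domesticTargets.foldl (fun d t =>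
            if !d.contains t && domesticMatch clean t then d.insert t kv.2 else d) d) d).get? t =
        match d.get? t with
        | some w => some w
        | none => (l.find? (fun kv => domesticMatch (PySem.Str.strip kv.1) t)).map (·.2)
  | [], d => by cases hg : d.get? t <;> simp [hg]
  | kv :: l, d => by
    simp only [List.foldl_cons]
    rw [fold2_get t ht l _]
    rw [fold2i_get_mem (PySem.Str.strip kv.1) kv.2 domesticTargets d t ht domesticTargets_nodup]
    cases hg : d.get? t with
    | some w => simp
    | none =>
      by_cases hm : domesticMatch (PySem.Str.strip kv.1) t = true
      · simp [hm]
      · simp only [Bool.not_eq_true] at hm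
        simp [hm]

theorem index_get (draft : List (String × String)) (t : String) (ht : t ∈ domesticTargets) :
    (domesticIndex draft).get? t =
      match draft.find? (fun kv => kv.1 == t) with
      | some kv => some kv.2
      | none => (draft.find? (fun kv => domesticMatch (PySem.Str.strip kv.1) t)).map (·.2) := by
  unfold domesticIndex
  rw [fold2_get t ht draft _]
  rw [fold1_get_mem draft domesticTargets PySem.Dict.empty t ht domesticTargets_nodup]
  cases hf : draft.find? (fun kv => kv.1 == t) with
  | some kv => rfl
  | none => simp [PySem.Dict.get?_empty]

theorem any_eq_find?_isSome (p : String × String → Bool) :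
    ∀ l : List (String × String), l.any p = (l.find? p).isSome
  | [] => rfl
  | kv :: l => by
    by_cases h : p kv = true
    · simp [List.any_cons, h]
    · simp only [Bool.not_eq_true] at h
      simp [List.any_cons, h, any_eq_find?_isSome p l]

theorem val_eq (draft : List (String × String)) (t : String) (ht : t ∈ domesticTargets) :
    domesticVal (domesticIndex draft) t = PySem.Str.strip (domestic_lookup_py draft t) := by
  rcases domesticTargets_fixed t ht with ⟨hs, h0⟩
  simp only [domesticVal, domestic_lookup_py, hs, h0]
  rw [PySem.Dict.getD_eq_get?_getD, index_get draft t ht]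
  rw [any_eq_find?_isSome]
  cases hf : draft.find? (fun kv => kv.1 == t) with
  | some kv => simp
  | none =>
    simp only [Option.isSome_none, Bool.false_eq_true, if_false]
    rw [domestic_scan_eq t draft]

theorem truthy_eq (draft : List (String × String)) (t : String) (ht : t ∈ domesticTargets) :
    domesticTruthy (domesticIndex draft) t = domestic_truthy_py draft t := by
  unfold domesticTruthy domestic_truthy_py
  rw [val_eq draft t ht]

-- ===== VERDICT (by name: the statement is the Claim_ definition above) =====
theorem domestic_core_errors_py_spec : Claim_equal_domestic_core_errors_py := by
  intro draft _
  show domestic_core_errors_py draft = domestic_core_errors_py_alt draft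
  simp only [domestic_core_errors_py, domestic_core_errors_py_alt]
  rw [PySem.List.foldl_append_if
        (fun lk : String × String => PySem.Str.strip (domestic_lookup_py draft lk.2) == "")
        (fun lk => [("field", lk.1), ("message", lk.1 ++ " is missing from the domestic supplemental.")]),
      PySem.List.foldl_append_if
        (fun t : String × String × String =>
          domestic_truthy_py draft t.2.1 && (PySem.Str.strip (domestic_lookup_py draft t.2.2) == ""))
        (fun t => [("field", t.1), ("message", t.1 ++ " is required for the selected domestic supplemental option.")])]
  have hreq :
      List.filter (fun lk : String × String => domesticVal (domesticIndex draft) lk.2 == "")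
          [("Victim Name", "VicName"), ("Response Date", "ResponseDate"),
           ("Response Time", "RespTime"), ("Initial Incident / Violation Reported", "Reported")] =
        List.filter (fun lk : String × String => PySem.Str.strip (domestic_lookup_py draft lk.2) == "")
          [("Victim Name", "VicName"), ("Response Date", "ResponseDate"),
           ("Response Time", "RespTime"), ("Initial Incident / Violation Reported", "Reported")] := by
    refine List.filter_congr ?_
    intro lk hlk
    fin_cases hlk <;> rw [val_eq draft _ (by decide)]
  have hrole :
      (!(domesticTruthy (domesticIndex draft) "Victim" || domesticTruthy (domesticIndex draft) "Suspect" ||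
         domesticTruthy (domesticIndex draft) "Child" || domesticTruthy (domesticIndex draft) "Other")) =
        (!(["Victim", "Suspect", "Child", "Other"].any (fun k => domestic_truthy_py draft k))) := by
    simp only [List.any_cons, List.any_nil, Bool.or_false]
    rw [truthy_eq draft "Victim" (by decide), truthy_eq draft "Suspect" (by decide),
        truthy_eq draft "Child" (by decide), truthy_eq draft "Other" (by decide)]
    simp [Bool.or_assoc]
  have hcond :
      List.filter (fun t : String × String × String =>
            domesticTruthy (domesticIndex draft) t.2.1 && domesticVal (domesticIndex draft) t.2.2 == "")
          [("Incident location detail", "IncidentOther", "Where"),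
           ("Temporary address location", "OtherLoc", "Location"),
           ("Other victim service location", "NO", "OtherLocation"),
           ("Victim first aid by", "VFA", "FirstAidBy.1"),
           ("Victim treatment facility", "VMTF", "Facility.1"),
           ("Suspect first aid by", "SFA", "FirstAidBy.2"),
           ("Suspect treatment facility", "SMTF", "Facility.2"),
           ("Injury explanation", "OtherEx", "InjExplain"),
           ("Second injury explanation", "OtherEx1", "InjExplain1")] =
        List.filter (fun t : String × String × String =>
            domestic_truthy_py draft t.2.1 && (PySem.Str.strip (domestic_lookup_py draft t.2.2) == ""))
          [("Incident location detail", "IncidentOther", "Where"),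
           ("Temporary address location", "OtherLoc", "Location"),
           ("Other victim service location", "NO", "OtherLocation"),
           ("Victim first aid by", "VFA", "FirstAidBy.1"),
           ("Victim treatment facility", "VMTF", "Facility.1"),
           ("Suspect first aid by", "SFA", "FirstAidBy.2"),
           ("Suspect treatment facility", "SMTF", "Facility.2"),
           ("Injury explanation", "OtherEx", "InjExplain"),
           ("Second injury explanation", "OtherEx1", "InjExplain1")] := by
    refine List.filter_congr ?_
    intro t htm
    fin_cases htm <;>
      rw [truthy_eq draft _ (by decide), val_eq draft _ (by decide)]
  rw [hreq, hrole, hcond]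
  simp
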